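-- pv_equiv track=rewrite | github.com/gaigechunfengchumandi/chishan | utils/segment_500hz/segment_500hz_openvino.py | found_peaks
-- ===== SOURCE A (Python) =====
-- def found_peaks(data_lead, onset_values):
--     # Initialize empty lists to store peak and valley coordinates
--     peak_indices, peak_values, valley_indices, valley_values, peak_amplitudes, valley_amplitudes = [], [], [], [], [], []
--     # Initialize variables to track current peak and valley
--     current_peak, current_peak_index = None, None
--     current_valley, current_valley_index = None, None
--
--     wave_regions = split_wave_regions(data_lead)# 把信号按心搏分成n个区域
--
--     # Iterate over the data_lead_x array
--     for region in wave_regions: # 遍历每个区域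
--         # 找到区域中的最大值（峰值）及其索引
--         current_peak_index, current_peak = max(region, key=lambda x: x[1])
--         # 找到区域中的最小值（谷值）及其索引
--         current_valley_index, current_valley = min(region, key=lambda x: x[1])
--
--         peak_indices.append(current_peak_index)
--         peak_values.append(current_peak)
--         valley_indices.append(current_valley_index)
--         valley_values.append(current_valley)
--
--         peak_amplitudes = [y - onset_y for y, onset_y in zip(peak_values, onset_values)]
--         valley_amplitudes = [y - onset for y, onset in zip(valley_values, onset_values)]
--
--     return peak_indices, peak_amplitudes, valley_indices, valley_amplitudes
--
-- def split_wave_regions(data_lead_x, noise_value=-10):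
--     regions = []
--     current_region = []
--
--     for i, value in enumerate(data_lead_x):
--         if value != noise_value:
--             # If the current value is part of the x-wave, add it to the current region
--             current_region.append((i, value))
--         else:
--             # If we encounter a noise value and the current region is not empty,
--             # save the current region and reset it
--             if current_region:
--                 regions.append(current_region)
--                 current_region = []
--
--     # Append the last region if it exists
--     if current_region:
--         regions.append(current_region)
--
--     return regions
-- ===== SOURCE B (Python) =====
-- def found_peaks(data_lead, onset_values):
--     # Single pass with run state: (best peak, best valley) for the open region.
--     peak_indices, peak_values, valley_indices, valley_values = [], [], [], []
--     run = None  # ((peak_i, peak_v), (valley_i, valley_v)) of the current region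
--     for i, v in enumerate(data_lead):
--         if v != -10:
--             if run is None:
--                 run = ((i, v), (i, v))
--             else:
--                 (pi_, pv_), (vi_, vv_) = run
--                 p = (i, v) if v > pv_ else (pi_, pv_)
--                 q = (i, v) if v < vv_ else (vi_, vv_)
--                 run = (p, q)
--         elif run is not None:
--             peak_indices.append(run[0][0]); peak_values.append(run[0][1])
--             valley_indices.append(run[1][0]); valley_values.append(run[1][1])
--             run = None
--     if run is not None:
--         peak_indices.append(run[0][0]); peak_values.append(run[0][1])
--         valley_indices.append(run[1][0]); valley_values.append(run[1][1])
--     peak_amplitudes = [y - o for y, o in zip(peak_values, onset_values)]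
--     valley_amplitudes = [y - o for y, o in zip(valley_values, onset_values)]
--     return peak_indices, peak_amplitudes, valley_indices, valley_amplitudes
-- ===== Notes on version B (the rewrite author's own statement) =====
-- stated objective: alternative
-- what changed: Replaces the build-all-regions-of-(index,value)-pairs pass plus per-region max/min scans and per-region recomputation of both amplitude lists with a single pass over data_lead that tracks the open region's running peak/valley and computes the amplitude zips once at the end.
import Mathlib
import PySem

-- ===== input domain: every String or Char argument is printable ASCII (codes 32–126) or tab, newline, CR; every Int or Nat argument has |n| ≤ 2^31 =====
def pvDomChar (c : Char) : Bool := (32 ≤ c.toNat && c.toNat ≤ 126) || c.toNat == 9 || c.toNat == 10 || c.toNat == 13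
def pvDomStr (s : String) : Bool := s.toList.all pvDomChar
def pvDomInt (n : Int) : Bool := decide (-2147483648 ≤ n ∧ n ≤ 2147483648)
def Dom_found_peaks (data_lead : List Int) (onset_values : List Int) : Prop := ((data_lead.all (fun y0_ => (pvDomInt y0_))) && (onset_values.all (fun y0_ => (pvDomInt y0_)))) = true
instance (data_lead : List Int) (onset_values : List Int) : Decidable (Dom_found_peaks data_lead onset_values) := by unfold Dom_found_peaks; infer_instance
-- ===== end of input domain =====

-- B replaces A's build-regions + per-region max/min scans + per-region amplitude recomputation
-- by one pass tracking the open region's running peak/valley, zipping amplitudes once at the end (objective: alternative).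

-- ===== PORT A =====
-- the enumerate loop of split_wave_regions as structural recursion over data, state (regions, current_region)
def splitGo (noise : Int) (i : Int) (regs : List (List (Int × Int))) (cur : List (Int × Int)) :
    List Int → List (List (Int × Int)) × List (Int × Int)
  | [] => (regs, cur)
  | v :: rest =>
    if v ≠ noise then splitGo noise (i + 1) regs (cur ++ [(i, v)]) rest
    else if cur = [] then splitGo noise (i + 1) regs [] rest
    else splitGo noise (i + 1) (regs ++ [cur]) [] rest

def split_wave_regions (data_lead_x : List Int) (noise_value : Int) : List (List (Int × Int)) :=
  let s := splitGo noise_value 0 [] [] data_lead_x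
  if s.2 = [] then s.1 else s.1 ++ [s.2]

-- one iteration of A's loop over wave_regions; state (peak_indices, peak_values, valley_indices,
-- valley_values, peak_amplitudes, valley_amplitudes); max/min with key x[1] via PySem.List.max?/min?
def found_peaks_step (onset_values : List Int)
    (st : List Int × List Int × List Int × List Int × List Int × List Int)
    (region : List (Int × Int)) :
    List Int × List Int × List Int × List Int × List Int × List Int :=
  match PySem.List.max? region (fun x => x.2), PySem.List.min? region (fun x => x.2) with
  | some p, some q =>
    let pi' := st.1 ++ [p.1]
    let pv' := st.2.1 ++ [p.2]
    let vi' := st.2.2.1 ++ [q.1]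
    let vv' := st.2.2.2.1 ++ [q.2]
    (pi', pv', vi', vv', List.zipWith (· - ·) pv' onset_values, List.zipWith (· - ·) vv' onset_values)
  | _, _ => st  -- unreachable: every region produced by split_wave_regions is nonempty (Python max/min would raise on [])

def found_peaks (data_lead : List Int) (onset_values : List Int) : List Int × List Int × List Int × List Int :=
  let wave_regions := split_wave_regions data_lead (-10)
  let st := wave_regions.foldl (found_peaks_step onset_values) ([], [], [], [], [], [])
  (st.1, st.2.2.2.2.1, st.2.2.1, st.2.2.2.2.2)

-- ===== PORT B =====
-- Source B's single loop as structural recursion; state (acc = four output lists, run = open region's (peak, valley))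
def altGo (i : Int) (acc : List Int × List Int × List Int × List Int)
    (run : Option ((Int × Int) × (Int × Int))) :
    List Int → (List Int × List Int × List Int × List Int) × Option ((Int × Int) × (Int × Int))
  | [] => (acc, run)
  | v :: rest =>
    if v ≠ -10 then
      match run with
      | none => altGo (i + 1) acc (some ((i, v), (i, v))) rest
      | some ((pi_, pv_), (vi_, vv_)) =>
        let p := if v > pv_ then (i, v) else (pi_, pv_)
        let q := if v < vv_ then (i, v) else (vi_, vv_)
        altGo (i + 1) acc (some (p, q)) rest
    else
      match run with
      | none => altGo (i + 1) acc none rest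
      | some ((pi_, pv_), (vi_, vv_)) =>
        altGo (i + 1) (acc.1 ++ [pi_], acc.2.1 ++ [pv_], acc.2.2.1 ++ [vi_], acc.2.2.2 ++ [vv_]) none rest

def found_peaks_alt (data_lead : List Int) (onset_values : List Int) : List Int × List Int × List Int × List Int :=
  let s := altGo 0 ([], [], [], []) none data_lead
  let acc :=
    match s.2 with
    | none => s.1
    | some ((pi_, pv_), (vi_, vv_)) =>
      (s.1.1 ++ [pi_], s.1.2.1 ++ [pv_], s.1.2.2.1 ++ [vi_], s.1.2.2.2 ++ [vv_])
  (acc.1, List.zipWith (· - ·) acc.2.1 onset_values, acc.2.2.1, List.zipWith (· - ·) acc.2.2.2 onset_values)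

-- ===== PRECONDITION & SPEC =====
def Spec_found_peaks (data_lead : List Int) (onset_values : List Int) (out : List Int × List Int × List Int × List Int) : Prop := out = found_peaks_alt data_lead onset_values
instance (data_lead : List Int) (onset_values : List Int) (out : List Int × List Int × List Int × List Int) : Decidable (Spec_found_peaks data_lead onset_values out) := by unfold Spec_found_peaks; infer_instance

-- ===== CLAIM (what is proved, stated in full; the proofs are below) =====
def Claim_equal_found_peaks : Prop := ∀ (data_lead : List Int) (onset_values : List Int), Dom_found_peaks data_lead onset_values → Spec_found_peaks data_lead onset_values (found_peaks data_lead onset_values)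

-- ===== LEMMAS AND PROOFS =====

-- running max/min steps (first extremum wins: replace only on strict improvement of the value)
def pkStep (a x : Int × Int) : Int × Int := if a.2 < x.2 then x else a
def vlStep (a x : Int × Int) : Int × Int := if x.2 < a.2 then x else a

-- the (peak, valley) of a region; none iff the region is empty
def runOf : List (Int × Int) → Option ((Int × Int) × (Int × Int))
  | [] => none
  | h :: t => some (t.foldl pkStep h, t.foldl vlStep h)

-- the four output lists extracted from a list of regions (empty regions contribute nothing)
def ex4 (regs : List (List (Int × Int))) : List Int × List Int × List Int × List Int :=
  ((regs.filterMap runOf).map (·.1.1), (regs.filterMap runOf).map (·.1.2),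
   (regs.filterMap runOf).map (·.2.1), (regs.filterMap runOf).map (·.2.2))

theorem runOf_nil : runOf [] = none := rfl

theorem runOf_cons (h : Int × Int) (t : List (Int × Int)) :
    runOf (h :: t) = some (t.foldl pkStep h, t.foldl vlStep h) := rfl

theorem max?_cons : ∀ (t : List (Int × Int)) (h : Int × Int),
    PySem.List.max? (h :: t) (fun x => x.2) = some (t.foldl pkStep h)
  | [], _ => rfl
  | x :: t, h => by
    have ih := max?_cons t (pkStep h x)
    have step : PySem.List.max? (h :: x :: t) (fun y => y.2)
        = PySem.List.max? (pkStep h x :: t) (fun y => y.2) := by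
      show List.foldl _ (if h.2 < x.2 then some x else some h) t
        = List.foldl _ (some (pkStep h x)) t
      split_ifs with hc <;> simp [pkStep, hc]
    rw [step, ih, List.foldl_cons]

theorem min?_cons : ∀ (t : List (Int × Int)) (h : Int × Int),
    PySem.List.min? (h :: t) (fun x => x.2) = some (t.foldl vlStep h)
  | [], _ => rfl
  | x :: t, h => by
    have ih := min?_cons t (vlStep h x)
    have step : PySem.List.min? (h :: x :: t) (fun y => y.2)
        = PySem.List.min? (vlStep h x :: t) (fun y => y.2) := by
      show List.foldl _ (if x.2 < h.2 then some x else some h) t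
        = List.foldl _ (some (vlStep h x)) t
      split_ifs with hc <;> simp [vlStep, hc]
    rw [step, ih, List.foldl_cons]

theorem ex4_cons_nil (rs : List (List (Int × Int))) : ex4 ([] :: rs) = ex4 rs := by
  simp [ex4, runOf]

theorem ex4_cons (h : Int × Int) (t : List (Int × Int)) (rs : List (List (Int × Int))) :
    ex4 ((h :: t) :: rs) =
      ((t.foldl pkStep h).1 :: (ex4 rs).1, (t.foldl pkStep h).2 :: (ex4 rs).2.1,
       (t.foldl vlStep h).1 :: (ex4 rs).2.2.1, (t.foldl vlStep h).2 :: (ex4 rs).2.2.2) := by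
  simp [ex4, runOf]

theorem ex4_append (xs ys : List (List (Int × Int))) :
    ex4 (xs ++ ys) =
      ((ex4 xs).1 ++ (ex4 ys).1, (ex4 xs).2.1 ++ (ex4 ys).2.1,
       (ex4 xs).2.2.1 ++ (ex4 ys).2.2.1, (ex4 xs).2.2.2 ++ (ex4 ys).2.2.2) := by
  simp [ex4, List.filterMap_append]

theorem ex4_singleton_cons (h : Int × Int) (t : List (Int × Int)) :
    ex4 [h :: t] =
      ([(t.foldl pkStep h).1], [(t.foldl pkStep h).2],
       [(t.foldl vlStep h).1], [(t.foldl vlStep h).2]) := by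
  simp [ex4, runOf]

-- A's fold over regions, with the amplitude invariant pa = zipWith (·-·) pv onset (likewise va)
theorem Afold (regions : List (List (Int × Int))) (onset : List Int) :
    ∀ (a1 a2 a3 a4 : List Int),
      List.foldl (found_peaks_step onset)
        (a1, a2, a3, a4, List.zipWith (· - ·) a2 onset, List.zipWith (· - ·) a4 onset) regions
      = (a1 ++ (ex4 regions).1, a2 ++ (ex4 regions).2.1, a3 ++ (ex4 regions).2.2.1,
         a4 ++ (ex4 regions).2.2.2,
         List.zipWith (· - ·) (a2 ++ (ex4 regions).2.1) onset,
         List.zipWith (· - ·) (a4 ++ (ex4 regions).2.2.2) onset) := by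
  induction regions with
  | nil => intro a1 a2 a3 a4; simp [ex4]
  | cons r rs ih =>
    intro a1 a2 a3 a4
    cases r with
    | nil =>
      have hstep : found_peaks_step onset
          (a1, a2, a3, a4, List.zipWith (· - ·) a2 onset, List.zipWith (· - ·) a4 onset) [] =
          (a1, a2, a3, a4, List.zipWith (· - ·) a2 onset, List.zipWith (· - ·) a4 onset) := by
        simp [found_peaks_step, PySem.List.max?, PySem.List.min?]
      rw [List.foldl_cons, hstep, ih, ex4_cons_nil]
    | cons h t =>
      rw [List.foldl_cons]
      have hstep : found_peaks_step onset
          (a1, a2, a3, a4, List.zipWith (· - ·) a2 onset, List.zipWith (· - ·) a4 onset) (h :: t) =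
          (a1 ++ [(t.foldl pkStep h).1], a2 ++ [(t.foldl pkStep h).2],
           a3 ++ [(t.foldl vlStep h).1], a4 ++ [(t.foldl vlStep h).2],
           List.zipWith (· - ·) (a2 ++ [(t.foldl pkStep h).2]) onset,
           List.zipWith (· - ·) (a4 ++ [(t.foldl vlStep h).2]) onset) := by
        simp [found_peaks_step, max?_cons, min?_cons]
      rw [hstep, ih, ex4_cons]
      simp [List.append_assoc]

theorem splitGo_regs (data : List Int) :
    ∀ (noise i : Int) (regs : List (List (Int × Int))) (cur : List (Int × Int)),
      splitGo noise i regs cur data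
      = (regs ++ (splitGo noise i [] cur data).1, (splitGo noise i [] cur data).2) := by
  induction data with
  | nil => intro noise i regs cur; simp [splitGo]
  | cons v rest ih =>
    intro noise i regs cur
    by_cases hv : v = noise
    · by_cases hc : cur = []
      · subst hc
        simp only [splitGo, if_neg (by simp [hv] : ¬(v ≠ noise))]
        exact ih noise (i + 1) regs []
      · simp only [splitGo, if_neg (by simp [hv] : ¬(v ≠ noise)), if_neg hc]
        simp only [List.nil_append]
        rw [ih noise (i + 1) (regs ++ [cur]) [], ih noise (i + 1) [cur] []]
        simp [List.append_assoc]
    · simp only [splitGo, if_pos hv]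
      exact ih noise (i + 1) regs (cur ++ [(i, v)])

-- the core coupling: B's single pass equals A's split followed by per-region extraction
theorem mainGo (data : List Int) :
    ∀ (i : Int) (cur : List (Int × Int)) (a1 a2 a3 a4 : List Int),
      altGo i (a1, a2, a3, a4) (runOf cur) data
      = ((a1 ++ (ex4 (splitGo (-10) i [] cur data).1).1,
          a2 ++ (ex4 (splitGo (-10) i [] cur data).1).2.1,
          a3 ++ (ex4 (splitGo (-10) i [] cur data).1).2.2.1,
          a4 ++ (ex4 (splitGo (-10) i [] cur data).1).2.2.2),
         runOf (splitGo (-10) i [] cur data).2) := by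
  induction data with
  | nil => intro i cur a1 a2 a3 a4; simp [altGo, splitGo, ex4]
  | cons v rest ih =>
    intro i cur a1 a2 a3 a4
    by_cases hv : v = -10
    · cases cur with
      | nil =>
        have hgo : altGo i (a1, a2, a3, a4) (runOf []) (v :: rest)
            = altGo (i + 1) (a1, a2, a3, a4) none rest := by
          simp [altGo, runOf, hv]
        have hsp : splitGo (-10) i [] [] (v :: rest) = splitGo (-10) (i + 1) [] [] rest := by
          simp [splitGo, hv]
        have H := ih (i + 1) [] a1 a2 a3 a4
        simp only [runOf_nil] at H
        rw [hgo, hsp]; exact H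
      | cons h t =>
        have hgo : altGo i (a1, a2, a3, a4) (runOf (h :: t)) (v :: rest)
            = altGo (i + 1)
                (a1 ++ [(t.foldl pkStep h).1], a2 ++ [(t.foldl pkStep h).2],
                 a3 ++ [(t.foldl vlStep h).1], a4 ++ [(t.foldl vlStep h).2]) none rest := by
          simp [altGo, runOf, hv]
        have hsp : splitGo (-10) i [] (h :: t) (v :: rest)
            = splitGo (-10) (i + 1) [h :: t] [] rest := by
          simp [splitGo, hv]
        have H := ih (i + 1) [] (a1 ++ [(t.foldl pkStep h).1]) (a2 ++ [(t.foldl pkStep h).2])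
          (a3 ++ [(t.foldl vlStep h).1]) (a4 ++ [(t.foldl vlStep h).2])
        simp only [runOf_nil] at H
        rw [hgo, hsp, splitGo_regs rest (-10) (i + 1) [h :: t] [], H]
        simp [ex4_cons, List.append_assoc]
    · cases cur with
      | nil =>
        have hgo : altGo i (a1, a2, a3, a4) (runOf []) (v :: rest)
            = altGo (i + 1) (a1, a2, a3, a4) (some ((i, v), (i, v))) rest := by
          simp [altGo, runOf, hv]
        have hsp : splitGo (-10) i [] [] (v :: rest) = splitGo (-10) (i + 1) [] [(i, v)] rest := by
          simp [splitGo, hv]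
        have H := ih (i + 1) [(i, v)] a1 a2 a3 a4
        simp only [runOf_cons, List.foldl_nil] at H
        rw [hgo, hsp]; exact H
      | cons h t =>
        rcases hp : t.foldl pkStep h with ⟨p1, p2⟩
        rcases hq : t.foldl vlStep h with ⟨q1, q2⟩
        have hgo : altGo i (a1, a2, a3, a4) (runOf (h :: t)) (v :: rest)
            = altGo (i + 1) (a1, a2, a3, a4)
                (some ((if v > p2 then (i, v) else (p1, p2)),
                       (if v < q2 then (i, v) else (q1, q2)))) rest := by
          simp [altGo, runOf, hv, hp, hq]
        have hsp : splitGo (-10) i [] (h :: t) (v :: rest)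
            = splitGo (-10) (i + 1) [] ((h :: t) ++ [(i, v)]) rest := by
          simp [splitGo, hv]
        have H := ih (i + 1) ((h :: t) ++ [(i, v)]) a1 a2 a3 a4
        have hr : runOf ((h :: t) ++ [(i, v)])
            = some ((if v > p2 then (i, v) else (p1, p2)),
                    (if v < q2 then (i, v) else (q1, q2))) := by
          simp only [List.cons_append, runOf, List.foldl_append, List.foldl_cons, List.foldl_nil,
            hp, hq, pkStep, vlStep]
        rw [hr] at H
        rw [hgo, hsp]; exact H

-- ===== VERDICT (by name: the statement is the Claim_ definition above) =====
theorem found_peaks_spec : Claim_equal_found_peaks := by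
  intro data onset _
  show found_peaks data onset = found_peaks_alt data onset
  have hA := Afold (split_wave_regions data (-10)) onset [] [] [] []
  simp only [List.nil_append, List.zipWith_nil_left] at hA
  have hB := mainGo data 0 [] [] [] [] []
  rw [runOf_nil] at hB
  simp only [List.nil_append] at hB
  unfold found_peaks found_peaks_alt
  simp only [hA, hB]
  unfold split_wave_regions
  rcases hC : (splitGo (-10) 0 [] [] data).2 with _ | ⟨h, t⟩
  · simp [hC, runOf_nil]
  · simp [hC, runOf_cons, ex4_append, ex4_singleton_cons]
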